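-- pv_equiv track=rewrite | github.com/sharithomas/python_works | Day_finder_from_Date.py | get_year_days
-- ===== SOURCE A (Python) =====
-- def is_leap_yr(year):
--     flag =False
--     if (year%4==0 and year%100!=0) or year%400==0:
--       flag=True
--     return flag
--
-- def get_year_days(year):
--     diff_year = year - year_ref
--     days_total=0
--     #if year is negative consider next year to ref year. eg if year = 2018 Dec 1 consider year 2019 only
--     if diff_year < 0 :
--         year_gap_flag =-1
--         for yr in range (year+1 , year_ref) :
--             if is_leap_yr(yr) is True:
--                 days_total = days_total +366
--             else:
--                  days_total = days_total + 365
--     #if year is positive consider years till ref year(except ref yr). eg if year = 2022 Dec 1 consider year 2020 , 2021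
--     else:
--         year_gap_flag =1
--         for yr in range (year_ref , year) :
--             if is_leap_yr(yr) is True:
--                 days_total = days_total + 366
--             else:
--                 days_total = days_total + 365
--     return year_gap_flag ,days_total
--
-- year_ref=2020
-- ===== SOURCE B (Python) =====
-- year_ref = 2020
--
-- def _leaps_before(y):
--     # number of leap years strictly below y (proleptic Gregorian rule)
--     z = y - 1
--     return z // 4 - z // 100 + z // 400
--
-- def get_year_days(year):
--     if year < year_ref:
--         lo, hi, flag = year + 1, year_ref, -1
--     else:
--         lo, hi, flag = year_ref, year, 1
--     return flag, 365 * (hi - lo) + _leaps_before(hi) - _leaps_before(lo)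
-- ===== Notes on version B (the rewrite author's own statement) =====
-- stated objective: faster
-- what changed: Replaced the year-by-year loop summing 365/366 with a closed-form count: days = 365*span + (leap years in the interval) computed by the floor-division formula z//4 - z//100 + z//400.
import Mathlib
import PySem

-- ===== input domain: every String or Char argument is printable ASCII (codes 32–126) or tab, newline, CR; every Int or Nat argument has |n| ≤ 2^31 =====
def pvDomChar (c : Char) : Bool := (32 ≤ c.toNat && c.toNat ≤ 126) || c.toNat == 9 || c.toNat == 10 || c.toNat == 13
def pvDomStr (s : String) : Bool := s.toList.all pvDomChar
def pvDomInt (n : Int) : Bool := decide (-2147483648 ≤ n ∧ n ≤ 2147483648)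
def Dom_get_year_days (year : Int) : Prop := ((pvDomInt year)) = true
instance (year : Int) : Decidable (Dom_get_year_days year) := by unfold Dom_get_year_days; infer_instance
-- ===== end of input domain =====

-- B replaces A's year-by-year loop with a closed-form leap-year count via floor division (faster, O(1)).

-- ===== PORT A =====
def is_leap_yr (year : Int) : Bool :=
  let flag := false
  let flag := if (PySem.Int.mod year 4 = 0 ∧ PySem.Int.mod year 100 ≠ 0) ∨ PySem.Int.mod year 400 = 0
              then true else flag
  flag

def get_year_days (year : Int) : Int × Int :=
  let year_ref : Int := 2020
  let diff_year := year - year_ref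
  let days_total : Int := 0
  if diff_year < 0 then
    let year_gap_flag : Int := -1
    let days_total := (PySem.List.pyRange (year + 1) year_ref 1).foldl
      (fun days_total yr => if is_leap_yr yr = true then days_total + 366 else days_total + 365)
      days_total
    (year_gap_flag, days_total)
  else
    let year_gap_flag : Int := 1
    let days_total := (PySem.List.pyRange year_ref year 1).foldl
      (fun days_total yr => if is_leap_yr yr = true then days_total + 366 else days_total + 365)
      days_total
    (year_gap_flag, days_total)

-- ===== PORT B =====
def leaps_before (y : Int) : Int :=
  let z := y - 1
  PySem.Int.floordiv z 4 - PySem.Int.floordiv z 100 + PySem.Int.floordiv z 400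

def get_year_days_alt (year : Int) : Int × Int :=
  let year_ref : Int := 2020
  if year < year_ref then
    (-1, 365 * (year_ref - (year + 1)) + leaps_before year_ref - leaps_before (year + 1))
  else
    (1, 365 * (year - year_ref) + leaps_before year - leaps_before year_ref)

-- ===== PRECONDITION & SPEC =====
def Spec_get_year_days (year : Int) (out : Int × Int) : Prop := out = get_year_days_alt year
instance (year : Int) (out : Int × Int) : Decidable (Spec_get_year_days year out) := by unfold Spec_get_year_days; infer_instance

-- ===== CLAIM (what is proved, stated in full; the proofs are below) =====
def Claim_equal_get_year_days : Prop := ∀ (year : Int), Dom_get_year_days year → Spec_get_year_days year (get_year_days year)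

-- ===== LEMMAS AND PROOFS =====

-- leaps_before steps by exactly the leap indicator
theorem leaps_before_succ (a : Int) :
    leaps_before (a + 1) = leaps_before a + (if is_leap_yr a = true then 1 else 0) := by
  simp only [leaps_before, is_leap_yr, add_sub_cancel_right,
    PySem.Int.floordiv_eq_ediv_of_pos (a := a) (by norm_num : (0:Int) < 4),
    PySem.Int.floordiv_eq_ediv_of_pos (a := a) (by norm_num : (0:Int) < 100),
    PySem.Int.floordiv_eq_ediv_of_pos (a := a) (by norm_num : (0:Int) < 400),
    PySem.Int.floordiv_eq_ediv_of_pos (a := a - 1) (by norm_num : (0:Int) < 4),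
    PySem.Int.floordiv_eq_ediv_of_pos (a := a - 1) (by norm_num : (0:Int) < 100),
    PySem.Int.floordiv_eq_ediv_of_pos (a := a - 1) (by norm_num : (0:Int) < 400),
    PySem.Int.mod_eq_emod_of_pos (a := a) (by norm_num : (0:Int) < 4),
    PySem.Int.mod_eq_emod_of_pos (a := a) (by norm_num : (0:Int) < 100),
    PySem.Int.mod_eq_emod_of_pos (a := a) (by norm_num : (0:Int) < 400)]
  split_ifs with h <;> simp_all <;> omega

-- A's loop body summed over range(a, b) equals the closed form
theorem loop_sum (n : Nat) : ∀ (a init : Int),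
    (PySem.List.pyRange a (a + n) 1).foldl
      (fun d yr => if is_leap_yr yr = true then d + 366 else d + 365) init
      = init + 365 * n + leaps_before (a + n) - leaps_before a := by
  induction n with
  | zero => intro a init; simp [PySem.List.pyRange_one_eq_nil (le_refl a)]
  | succ k ih =>
    intro a init
    push_cast
    rw [show a + ((k : Int) + 1) = (a + 1) + k by ring,
        PySem.List.pyRange_one_cons (by omega : a < (a + 1) + k)]
    simp only [List.foldl_cons]
    rw [ih (a + 1)]
    have := leaps_before_succ a
    split_ifs with h <;> simp [h] at this ⊢ <;> omega

theorem loop_sum' (a b : Int) (h : a ≤ b) (init : Int) :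
    (PySem.List.pyRange a b 1).foldl
      (fun d yr => if is_leap_yr yr = true then d + 366 else d + 365) init
      = init + 365 * (b - a) + leaps_before b - leaps_before a := by
  have hb : b = a + ((b - a).toNat : Int) := by omega
  rw [hb, loop_sum (b - a).toNat a init]
  omega

-- ===== VERDICT (by name: the statement is the Claim_ definition above) =====
theorem get_year_days_spec : Claim_equal_get_year_days := by
  intro year _
  unfold Spec_get_year_days get_year_days get_year_days_alt
  simp only []
  by_cases h : year - 2020 < 0
  · rw [if_pos h, if_pos (by omega : year < 2020),
        loop_sum' (year + 1) 2020 (by omega) 0]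
    simp
  · rw [if_neg h, if_neg (by omega : ¬ year < 2020),
        loop_sum' 2020 year (by omega) 0]
    simp
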